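-- pv_equiv track=rewrite | github.com/Andrei-Cos/AdventOfCodeDay1-2 | 2023/day1.py | word2num
-- ===== SOURCE A (Python) =====
-- def word2num(mot):
--     # Dictionary mapping words to a specific string format
--     dico = {
--         'one': 'one1one',
--         'two': 'two2two',
--         'three': 'three3three',
--         'four': 'four4four',
--         'five': 'five5five',
--         'six': 'six6six',
--         'eight': 'eight8eight',
--         'nine': 'nine9nine'
--     }
--     for word, number in dico.items():  # Loop through the dictionary
--         mot = mot.replace(word, str(number))  # Replace words with their number format
--     digits = [char for char in mot if char.isdigit()]  # Extract all digits from the string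
--     digits = (''.join(digits))  # Join all digits into a single string
--     return digits  # Return the string of digits
-- ===== SOURCE B (Python) =====
-- def word2num(mot):
--     # One left-to-right scan: emit literal digits, and one digit per number-word starting here.
--     words = {'one': '1', 'two': '2', 'three': '3', 'four': '4',
--              'five': '5', 'six': '6', 'eight': '8', 'nine': '9'}
--     out = []
--     for i, ch in enumerate(mot):
--         if ch.isdigit():
--             out.append(ch)
--         else:
--             for w, d in words.items():
--                 if mot.startswith(w, i):
--                     out.append(d)
--                     break
--     return ''.join(out)
-- ===== Notes on version B (the rewrite author's own statement) =====
-- stated objective: idiomatic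
-- what changed: B replaces the eight chained full-string self-surround str.replace passes (plus a final digit-filter pass) by a single left-to-right scan that emits literal digits and, via startswith at each index, one digit per number-word occurrence.
import Mathlib
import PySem

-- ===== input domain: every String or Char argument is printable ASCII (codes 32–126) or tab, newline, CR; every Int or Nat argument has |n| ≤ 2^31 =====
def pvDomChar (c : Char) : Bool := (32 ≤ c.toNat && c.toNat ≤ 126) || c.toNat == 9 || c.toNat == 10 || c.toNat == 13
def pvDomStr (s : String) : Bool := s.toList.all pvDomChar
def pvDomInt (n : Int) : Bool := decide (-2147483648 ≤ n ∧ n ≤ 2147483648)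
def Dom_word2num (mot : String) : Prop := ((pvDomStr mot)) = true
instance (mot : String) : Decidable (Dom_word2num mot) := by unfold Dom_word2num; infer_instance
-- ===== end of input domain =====

-- B replaces A's eight chained self-surround str.replace passes (plus a digit-filter pass)
-- by a single left-to-right scan emitting literal digits and one digit per number-word match.


-- ===== PORT A =====
-- for word, number in dico.items(): mot = mot.replace(word, str(number)); then
-- [char for char in mot if char.isdigit()] (1-char strings kept as Char) and ''.join
def word2num (mot : String) : String :=
  let dico : PySem.Dict String String := PySem.Dict.mk
    [("one", "one1one"), ("two", "two2two"), ("three", "three3three"), ("four", "four4four"),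
     ("five", "five5five"), ("six", "six6six"), ("eight", "eight8eight"), ("nine", "nine9nine")]
  let mot2 := dico.items.foldl (fun m wn => PySem.Str.replace m wn.1 wn.2) mot
  let digits : List Char := mot2.toList.filter PySem.Chars.isdigit
  String.ofList digits


-- ===== PORT B =====
-- for i, ch in enumerate(mot): append ch if it is a digit, else the digit of the first
-- word w with mot.startswith(w, i) (ported as startswith on the suffix from i, exact since
-- enumerate yields 0 ≤ i ≤ len(mot)); finally ''.join(out)
def word2num_alt (mot : String) : String :=
  let words : PySem.Dict String String := PySem.Dict.mk
    [("one", "1"), ("two", "2"), ("three", "3"), ("four", "4"),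
     ("five", "5"), ("six", "6"), ("eight", "8"), ("nine", "9")]
  let cs := mot.toList
  let out : List String := (PySem.List.enumerate cs 0).foldl
    (fun out ic =>
      if PySem.Chars.isdigit ic.2 then out ++ [String.ofList [ic.2]]
      else
        match words.items.find? (fun wd => PySem.Chars.startswith (cs.drop ic.1.toNat) wd.1.toList) with
        | some wd => out ++ [wd.2]
        | none => out)
    []
  PySem.Str.join "" out


-- ===== PRECONDITION & SPEC =====
def Spec_word2num (mot : String) (out : String) : Prop := out = word2num_alt mot
instance (mot : String) (out : String) : Decidable (Spec_word2num mot out) := by unfold Spec_word2num; infer_instance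

-- ===== CLAIM (what is proved, stated in full; the proofs are below) =====
def Claim_equal_word2num : Prop := ∀ (mot : String), Dom_word2num mot → Spec_word2num mot (word2num mot)

-- ===== LEMMAS AND PROOFS =====

def repW (o : Char) (os new : List Char) : List Char → List Char
  | [] => []
  | c :: t =>
    if (o :: os).isPrefixOf (c :: t) then new ++ repW o os new (t.drop os.length)
    else c :: repW o os new t
termination_by l => l.length
decreasing_by
  all_goals simp <;> omega

theorem go_eq (o : Char) (os new : List Char) :
    ∀ fuel l acc, l.length ≤ fuel →
      PySem.Chars.replace.go (o :: os) new fuel l acc = acc.reverse ++ repW o os new l := by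
  intro fuel
  induction fuel with
  | zero =>
    intro l acc h
    have : l = [] := by cases l <;> simp_all
    subst this
    simp [PySem.Chars.replace.go, repW]
  | succ n ih =>
    intro l acc h
    cases l with
    | nil => simp [PySem.Chars.replace.go, repW]
    | cons c t =>
      rw [PySem.Chars.replace.go]
      by_cases hp : (o :: os).isPrefixOf (c :: t)
      · simp only [hp, if_true]
        rw [ih, repW]
        · simp [hp, List.drop]
        · simp at h ⊢; omega
      · simp only [hp, if_false]
        rw [ih t (c :: acc) (by simp at h ⊢; omega), repW]
        simp [hp]

theorem replace_eq (o : Char) (os new l : List Char) :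
    PySem.Chars.replace l (o :: os) new = repW o os new l := by
  rw [PySem.Chars.replace]
  simp [go_eq o os new l.length l [] (le_refl _)]

def cscan (K : List (List Char × Char)) : List Char → List Char
  | [] => []
  | c :: t =>
    (if PySem.Chars.isdigit c then [c]
     else
       match K.find? (fun p => p.1.isPrefixOf (c :: t)) with
       | some p => [p.2]
       | none => []) ++ cscan K t

def GoodW (w : List Char) (d : Char) (K : List (List Char × Char)) : Prop :=
  w ≠ [] ∧ w.all (fun c => !PySem.Chars.isdigit c) = true ∧ PySem.Chars.isdigit d = true ∧
  (∀ i ∈ List.range w.length, i ≠ 0 → ¬ (w.drop i <+: w)) ∧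
  (∀ p ∈ K, p.1.all (fun c => !PySem.Chars.isdigit c) = true ∧ ¬ w <:+: p.1 ∧ ¬ p.1 <:+: w)

theorem all_not_digit {l : List Char} (h : l.all (fun c => !PySem.Chars.isdigit c) = true)
    {c : Char} (hc : c ∈ l) : PySem.Chars.isdigit c = false := by
  have := List.all_eq_true.mp h c hc
  simpa using this

-- a nonempty proper suffix of w is not a prefix of w (border-freeness, unpacked)
theorem no_border {w : List Char} {d : Char} {K : List (List Char × Char)} (g : GoodW w d K)
    {u : List Char} (hs : u <:+ w) (hne : u ≠ []) (hnw : u ≠ w) : ¬ (u <+: w) := by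
  intro hp
  obtain ⟨t, ht⟩ := hs
  have hd : w.drop t.length = u := by rw [← ht]; simp
  have hlt : t.length < w.length := by
    rw [← ht]; simp
    cases u with | nil => exact absurd rfl hne | cons a b => simp
  have htne : t.length ≠ 0 := by
    intro h0
    have : t = [] := by cases t <;> simp_all
    subst this; simp at ht; exact hnw ht
  exact g.2.2.2.1 t.length (List.mem_range.mpr hlt) htne (hd ▸ hp)

theorem find?_congr_pred {α : Type} (p q : α → Bool) (l : List α) (h : ∀ a ∈ l, p a = q a) :
    l.find? p = l.find? q := by
  induction l with
  | nil => rfl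
  | cons a t ih =>
    simp only [List.find?_cons, h a (by simp)]
    cases q a <;> simp [ih (fun x hx => h x (by simp [hx]))]

-- being a prefix transfers across one replace pass, for words with no digits and no w inside
theorem prefix_transfer (o : Char) (os : List Char) (d : Char)
    (hd : PySem.Chars.isdigit d = true) :
    ∀ t v : List Char, (∀ c ∈ v, PySem.Chars.isdigit c = false) → ¬ ((o :: os) <:+: v) →
      (v <+: repW o os ((o :: os) ++ d :: (o :: os)) t ↔ v <+: t) := by
  intro t
  induction t with
  | nil => intro v h1 h2; rw [repW]
  | cons c t' ih =>
    intro v h1 h2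
    rw [repW]
    by_cases hp : (o :: os).isPrefixOf (c :: t')
    · rw [if_pos hp]
      have hw_big : (o :: os) <+: (o :: os) ++ d :: (o :: os) ++ repW o os ((o :: os) ++ d :: (o :: os)) (t'.drop os.length) := ⟨d :: ((o :: os) ++ repW o os ((o :: os) ++ d :: (o :: os)) (t'.drop os.length)), by simp⟩
      have hpre : (o :: os) <+: (c :: t') := List.isPrefixOf_iff_prefix.mp hp
      constructor
      · intro hv
        rcases List.prefix_or_prefix_of_prefix hv hw_big with h | h
        · exact h.trans hpre
        · obtain ⟨v₂, hv₂⟩ := h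
          subst hv₂
          have hv₂p : v₂ <+: d :: ((o :: os) ++ repW o os ((o :: os) ++ d :: (o :: os)) (t'.drop os.length)) := by
            rw [← List.prefix_append_right_inj (o :: os)]
            simpa using hv
          cases v₂ with
          | nil => simp at h2
          | cons a v₃ =>
            exfalso
            have had : a = d := (List.cons_prefix_cons.mp hv₂p).1
            have hdig : PySem.Chars.isdigit a = false := h1 a (by simp)
            rw [had, hd] at hdig
            simp at hdig
      · intro hv
        rcases List.prefix_or_prefix_of_prefix hv hpre with h | h
        · exact h.trans hw_big
        · exact absurd (List.IsPrefix.isInfix h) h2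
    · rw [if_neg hp]
      cases v with
      | nil => simp
      | cons a v₂ =>
        rw [List.cons_prefix_cons, List.cons_prefix_cons]
        constructor
        · rintro ⟨rfl, h⟩
          exact ⟨rfl, (ih v₂ (fun x hx => h1 x (by simp [hx]))
            (fun hinf => h2 (List.infix_cons hinf))).mp h⟩
        · rintro ⟨rfl, h⟩
          exact ⟨rfl, (ih v₂ (fun x hx => h1 x (by simp [hx]))
            (fun hinf => h2 (List.infix_cons hinf))).mpr h⟩

-- prefix test transfers across a replace pass applied after any left context x
theorem prefix_transfer_append (o : Char) (os : List Char) (d : Char)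
    (hd : PySem.Chars.isdigit d = true) :
    ∀ (x t v : List Char), (∀ c ∈ v, PySem.Chars.isdigit c = false) → ¬ ((o :: os) <:+: v) →
      (v <+: x ++ repW o os ((o :: os) ++ d :: (o :: os)) t ↔ v <+: x ++ t) := by
  intro x t v h1 h2
  constructor
  · intro hv
    rcases List.prefix_or_prefix_of_prefix hv (List.prefix_append x _) with h | h
    · exact h.trans (List.prefix_append x t)
    · obtain ⟨v₂, rfl⟩ := h
      rw [List.prefix_append_right_inj]
      rw [List.prefix_append_right_inj] at hv
      exact (prefix_transfer o os d hd t v₂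
        (fun c hc => h1 c (by simp [hc]))
        (fun hinf => h2 (hinf.trans (List.suffix_append x v₂).isInfix))).mp hv
  · intro hv
    rcases List.prefix_or_prefix_of_prefix hv (List.prefix_append x _) with h | h
    · exact h.trans (List.prefix_append x _)
    · obtain ⟨v₂, rfl⟩ := h
      rw [List.prefix_append_right_inj]
      rw [List.prefix_append_right_inj] at hv
      exact (prefix_transfer o os d hd t v₂
        (fun c hc => h1 c (by simp [hc]))
        (fun hinf => h2 (hinf.trans (List.suffix_append x v₂).isInfix))).mpr hv

theorem find_transfer {o : Char} {os : List Char} {d : Char} {K : List (List Char × Char)}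
    (g : GoodW (o :: os) d K) (x t : List Char) :
    K.find? (fun p => p.1.isPrefixOf (x ++ repW o os ((o :: os) ++ d :: (o :: os)) t)) =
      K.find? (fun p => p.1.isPrefixOf (x ++ t)) := by
  apply find?_congr_pred
  intro p hp
  rw [Bool.eq_iff_iff]
  simp only [List.isPrefixOf_iff_prefix]
  exact prefix_transfer_append o os d g.2.2.1 x t p.1 (fun c hc => all_not_digit (g.2.2.2.2 p hp).1 hc)
    (g.2.2.2.2 p hp).2.1

-- no K-word matches at the start of w ++ Y
theorem find_none_at_w {o : Char} {os : List Char} {d : Char} {K : List (List Char × Char)}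
    (g : GoodW (o :: os) d K) (Y : List Char) :
    K.find? (fun p => p.1.isPrefixOf ((o :: os) ++ Y)) = none := by
  rw [List.find?_eq_none]
  intro p hp hpre'
  rw [List.isPrefixOf_iff_prefix] at hpre'
  rcases List.prefix_or_prefix_of_prefix hpre' (List.prefix_append (o :: os) Y) with h | h
  · exact (g.2.2.2.2 p hp).2.2 h.isInfix
  · exact (g.2.2.2.2 p hp).2.1 h.isInfix

-- scanning a suffix of w followed by the inserted digit emits exactly that digit
theorem scan_skip {w : List Char} {d : Char} {K : List (List Char × Char)} (g : GoodW w d K) :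
    ∀ u z, u <:+ w → cscan K (u ++ d :: z) = d :: cscan K z := by
  intro u
  induction u with
  | nil => intro z _; simp only [List.nil_append]; rw [cscan]; simp [g.2.2.1]
  | cons c u' ih =>
    intro z hs
    have hc : PySem.Chars.isdigit c = false := all_not_digit g.2.1 (hs.subset (by simp))
    have hfind : K.find? (fun p => p.1.isPrefixOf (c :: (u' ++ d :: z))) = none := by
      rw [List.find?_eq_none]
      intro p hp hpre'
      rw [List.isPrefixOf_iff_prefix] at hpre'
      have hpre : p.1 <+: (c :: u') ++ (d :: z) := by simpa using hpre'
      rcases List.prefix_or_prefix_of_prefix hpre (List.prefix_append (c :: u') (d :: z)) with h | h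
      · exact (g.2.2.2.2 p hp).2.2 (h.isInfix.trans hs.isInfix)
      · obtain ⟨q, hq⟩ := h
        cases q with
        | nil => exact (g.2.2.2.2 p hp).2.2 (by rw [← hq]; simpa using hs.isInfix)
        | cons b q' =>
          have hbq : (b :: q') <+: (d :: z) := by
            rw [← List.prefix_append_right_inj (c :: u'), hq]
            exact hpre
          have hb : b = d := (List.cons_prefix_cons.mp hbq).1
          have : PySem.Chars.isdigit b = false := all_not_digit (g.2.2.2.2 p hp).1 (by rw [← hq]; simp)
          rw [hb, g.2.2.1] at this
          simp at this
    rw [List.cons_append, cscan]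
    simp only [hc, hfind]
    simp [ih z ((List.suffix_cons c u').trans hs)]

theorem cscan_nil (K : List (List Char × Char)) : cscan K [] = [] := by rw [cscan]

theorem cscan_cons (K : List (List Char × Char)) (c : Char) (t : List Char) :
    cscan K (c :: t) =
      (if PySem.Chars.isdigit c then [c]
       else
         match K.find? (fun p => p.1.isPrefixOf (c :: t)) with
         | some p => [p.2]
         | none => []) ++ cscan K t := by rw [cscan]

-- scanning a proper suffix of w: one replace pass on the rest commutes with adding (w,d) to K
theorem scan_tail {o : Char} {os : List Char} {d : Char} {K : List (List Char × Char)}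
    (g : GoodW (o :: os) d K) (s₂ : List Char)
    (hG : cscan K (repW o os ((o :: os) ++ d :: (o :: os)) s₂) = cscan (((o :: os), d) :: K) s₂) :
    ∀ u, u <:+ (o :: os) → u ≠ (o :: os) →
      cscan K (u ++ repW o os ((o :: os) ++ d :: (o :: os)) s₂) = cscan (((o :: os), d) :: K) (u ++ s₂) := by
  intro u
  induction u with
  | nil => intro _ _; simpa using hG
  | cons c u' ih =>
    intro hs hnw
    have hc : PySem.Chars.isdigit c = false := all_not_digit g.2.1 (hs.subset (by simp))
    have hwtest : ((o :: os).isPrefixOf ((c :: u') ++ s₂)) = false := by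
      rw [Bool.eq_false_iff]
      intro hpre'
      rw [List.isPrefixOf_iff_prefix] at hpre'
      rcases List.prefix_or_prefix_of_prefix hpre' (List.prefix_append (c :: u') s₂) with h | h
      · have hlen : (c :: u').length ≤ (o :: os).length := hs.length_le
        have : (o :: os) = (c :: u') := h.eq_of_length (le_antisymm h.length_le hlen |>.symm ▸ rfl)
        exact hnw this.symm
      · exact no_border g hs (by simp) hnw h
    have htail := ih ((List.suffix_cons c u').trans hs)
      (by intro he; have := hs.length_le; rw [← he] at this; simp at this)
    simp only [List.cons_append] at htail ⊢
    rw [cscan_cons K c, cscan_cons ((o :: os, d) :: K) c, htail]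
    congr 1
    simp only [hc, if_false]
    rw [List.find?_cons]
    rw [show ((o :: os).isPrefixOf (c :: (u' ++ s₂))) = false by simpa using hwtest]
    have := find_transfer g (c :: u') s₂
    simp only [List.cons_append] at this
    rw [this]

-- one replace pass commutes with the scan: replaced word becomes an extra scan word
theorem scan_replace {o : Char} {os : List Char} {d : Char} {K : List (List Char × Char)}
    (g : GoodW (o :: os) d K) :
    ∀ s, cscan K (repW o os ((o :: os) ++ d :: (o :: os)) s) = cscan (((o :: os), d) :: K) s := by
  suffices h : ∀ n s, s.length ≤ n →
      cscan K (repW o os ((o :: os) ++ d :: (o :: os)) s) = cscan (((o :: os), d) :: K) s by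
    intro s; exact h s.length s (le_refl _)
  intro n
  induction n with
  | zero =>
    intro s hs
    have : s = [] := by cases s <;> simp_all
    subst this
    rw [repW, cscan_nil, cscan_nil]
  | succ n ih =>
    intro s hlen
    cases s with
    | nil => rw [repW, cscan_nil, cscan_nil]
    | cons c t =>
      rw [repW]
      by_cases hp : (o :: os).isPrefixOf (c :: t)
      · rw [if_pos hp]
        have hpre : (o :: os) <+: (c :: t) := List.isPrefixOf_iff_prefix.mp hp
        obtain ⟨s₂, hs₂⟩ := hpre
        have hco : c = o := by
          have := hs₂; simp [List.cons_append] at this; exact this.1.symm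
        have ht : t = os ++ s₂ := by
          have := hs₂; simp [List.cons_append] at this; exact this.2.symm
        have hdrop : t.drop os.length = s₂ := by rw [ht, List.drop_left]
        have hlen₂ : s₂.length ≤ n := by
          have h1 := congrArg List.length ht; simp at h1 hlen; omega
        have hG := ih s₂ hlen₂
        -- LHS: (w ++ d :: w) ++ repW s₂ = w ++ (d :: (w ++ repW s₂))
        rw [hdrop]
        have lhs1 : cscan K (((o :: os) ++ d :: (o :: os)) ++ repW o os ((o :: os) ++ d :: (o :: os)) s₂)
            = d :: cscan K ((o :: os) ++ repW o os ((o :: os) ++ d :: (o :: os)) s₂) := by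
          rw [List.append_assoc]
          exact scan_skip g (o :: os) _ (List.suffix_refl _)
        rw [lhs1]
        -- head of w ++ Y emits nothing
        have lhs2 : cscan K ((o :: os) ++ repW o os ((o :: os) ++ d :: (o :: os)) s₂)
            = cscan K (os ++ repW o os ((o :: os) ++ d :: (o :: os)) s₂) := by
          have hno := find_none_at_w g (repW o os ((o :: os) ++ d :: (o :: os)) s₂)
          simp only [List.cons_append] at hno ⊢
          rw [cscan_cons, all_not_digit g.2.1 (by simp), hno]
          simp
        rw [lhs2]
        have hos : os ≠ (o :: os) := by
          intro he; have := congrArg List.length he; simp at this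
        rw [scan_tail g s₂ hG os (List.suffix_cons o os) hos]
        -- RHS: cscan ((w,d)::K) (c :: t) with w matching at the head
        have hmatch : ((o :: os).isPrefixOf (o :: (os ++ s₂))) = true := by
          rw [List.isPrefixOf_iff_prefix]
          exact ⟨s₂, by simp⟩
        rw [hco, ht, cscan_cons, all_not_digit g.2.1 (by simp), List.find?_cons, hmatch]
        simp
      · rw [if_neg hp]
        rw [cscan_cons, cscan_cons, ih t (by simp at hlen; omega)]
        congr 1
        by_cases hdig : PySem.Chars.isdigit c
        · rw [if_pos hdig, if_pos hdig]
        · rw [if_neg hdig, if_neg hdig]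
          rw [List.find?_cons]
          have := find_transfer g [c] t
          simp only [List.singleton_append] at this
          rw [this]
          simp [Bool.eq_false_iff.mpr hp]

def K8 : List (List Char × Char) :=
  [("one".toList, '1'), ("two".toList, '2'), ("three".toList, '3'), ("four".toList, '4'),
   ("five".toList, '5'), ("six".toList, '6'), ("eight".toList, '8'), ("nine".toList, '9')]

theorem filter_cscan (t : List Char) : t.filter PySem.Chars.isdigit = cscan [] t := by
  induction t with
  | nil => rw [cscan_nil]; rfl
  | cons c t ih =>
    rw [cscan_cons, List.filter_cons]
    cases h : PySem.Chars.isdigit c <;> simp [h, ih, List.find?]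

theorem toList_foldl_replace (l : List (String × String)) (m : String) :
    (l.foldl (fun m wn => PySem.Str.replace m wn.1 wn.2) m).toList
      = l.foldl (fun cs wn => PySem.Chars.replace cs wn.1.toList wn.2.toList) m.toList := by
  induction l generalizing m with
  | nil => rfl
  | cons a t ih => simp [List.foldl, ih, PySem.Str.toList_replace]

set_option maxRecDepth 8192 in
theorem A_chars (mot : String) : (word2num mot).toList = cscan K8 mot.toList := by
  show (String.ofList _).toList = _
  rw [String.toList_ofList]
  rw [toList_foldl_replace]
  simp only [List.foldl]
  rw [show "one".toList = 'o' :: ['n', 'e'] from rfl,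
      show "two".toList = 't' :: ['w', 'o'] from rfl,
      show "three".toList = 't' :: ['h', 'r', 'e', 'e'] from rfl,
      show "four".toList = 'f' :: ['o', 'u', 'r'] from rfl,
      show "five".toList = 'f' :: ['i', 'v', 'e'] from rfl,
      show "six".toList = 's' :: ['i', 'x'] from rfl,
      show "eight".toList = 'e' :: ['i', 'g', 'h', 't'] from rfl,
      show "nine".toList = 'n' :: ['i', 'n', 'e'] from rfl]
  rw [replace_eq, replace_eq, replace_eq, replace_eq, replace_eq, replace_eq, replace_eq, replace_eq]
  rw [show "one1one".toList = ('o' :: ['n', 'e']) ++ '1' :: ('o' :: ['n', 'e']) from rfl,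
      show "two2two".toList = ('t' :: ['w', 'o']) ++ '2' :: ('t' :: ['w', 'o']) from rfl,
      show "three3three".toList = ('t' :: ['h', 'r', 'e', 'e']) ++ '3' :: ('t' :: ['h', 'r', 'e', 'e']) from rfl,
      show "four4four".toList = ('f' :: ['o', 'u', 'r']) ++ '4' :: ('f' :: ['o', 'u', 'r']) from rfl,
      show "five5five".toList = ('f' :: ['i', 'v', 'e']) ++ '5' :: ('f' :: ['i', 'v', 'e']) from rfl,
      show "six6six".toList = ('s' :: ['i', 'x']) ++ '6' :: ('s' :: ['i', 'x']) from rfl,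
      show "eight8eight".toList = ('e' :: ['i', 'g', 'h', 't']) ++ '8' :: ('e' :: ['i', 'g', 'h', 't']) from rfl,
      show "nine9nine".toList = ('n' :: ['i', 'n', 'e']) ++ '9' :: ('n' :: ['i', 'n', 'e']) from rfl]
  rw [filter_cscan]
  rw [scan_replace (show GoodW ('n' :: ['i', 'n', 'e']) '9' [] by unfold GoodW; decide)]
  rw [scan_replace (show GoodW ('e' :: ['i', 'g', 'h', 't']) '8' [(['n', 'i', 'n', 'e'], '9')] by unfold GoodW; decide)]
  rw [scan_replace (show GoodW ('s' :: ['i', 'x']) '6'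
        [(['e', 'i', 'g', 'h', 't'], '8'), (['n', 'i', 'n', 'e'], '9')] by unfold GoodW; decide)]
  rw [scan_replace (show GoodW ('f' :: ['i', 'v', 'e']) '5'
        [(['s', 'i', 'x'], '6'), (['e', 'i', 'g', 'h', 't'], '8'), (['n', 'i', 'n', 'e'], '9')] by unfold GoodW; decide)]
  rw [scan_replace (show GoodW ('f' :: ['o', 'u', 'r']) '4'
        [(['f', 'i', 'v', 'e'], '5'), (['s', 'i', 'x'], '6'), (['e', 'i', 'g', 'h', 't'], '8'), (['n', 'i', 'n', 'e'], '9')] by unfold GoodW; decide)]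
  rw [scan_replace (show GoodW ('t' :: ['h', 'r', 'e', 'e']) '3'
        [(['f', 'o', 'u', 'r'], '4'), (['f', 'i', 'v', 'e'], '5'), (['s', 'i', 'x'], '6'), (['e', 'i', 'g', 'h', 't'], '8'), (['n', 'i', 'n', 'e'], '9')] by unfold GoodW; decide)]
  rw [scan_replace (show GoodW ('t' :: ['w', 'o']) '2'
        [(['t', 'h', 'r', 'e', 'e'], '3'), (['f', 'o', 'u', 'r'], '4'), (['f', 'i', 'v', 'e'], '5'), (['s', 'i', 'x'], '6'), (['e', 'i', 'g', 'h', 't'], '8'), (['n', 'i', 'n', 'e'], '9')] by unfold GoodW; decide)]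
  rw [scan_replace (show GoodW ('o' :: ['n', 'e']) '1'
        [(['t', 'w', 'o'], '2'), (['t', 'h', 'r', 'e', 'e'], '3'), (['f', 'o', 'u', 'r'], '4'), (['f', 'i', 'v', 'e'], '5'), (['s', 'i', 'x'], '6'), (['e', 'i', 'g', 'h', 't'], '8'), (['n', 'i', 'n', 'e'], '9')] by unfold GoodW; decide)]
  rfl

-- the inner first-match over the dict equals the first match over K8, at any suffix v
theorem emitB (v : List Char) :
    (match ([("one", "1"), ("two", "2"), ("three", "3"), ("four", "4"),
             ("five", "5"), ("six", "6"), ("eight", "8"), ("nine", "9")] : List (String × String)).find?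
        (fun wd => PySem.Chars.startswith v wd.1.toList) with
     | some wd => [wd.2]
     | none => ([] : List String)) =
    (match K8.find? (fun p => p.1.isPrefixOf v) with
     | some p => [String.ofList [p.2]]
     | none => []) := by
  simp only [PySem.Chars.startswith, K8, List.find?_cons]
  cases h1 : "one".toList.isPrefixOf v <;>
  cases h2 : "two".toList.isPrefixOf v <;>
  cases h3 : "three".toList.isPrefixOf v <;>
  cases h4 : "four".toList.isPrefixOf v <;>
  cases h5 : "five".toList.isPrefixOf v <;>
  cases h6 : "six".toList.isPrefixOf v <;>
  cases h7 : "eight".toList.isPrefixOf v <;>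
  cases h8 : "nine".toList.isPrefixOf v <;>
  simp only [h1, h2, h3, h4, h5, h6, h7, h8, List.find?] <;> rfl

theorem B_fold (cs : List Char) :
    ∀ (u : List Char) (k : Int) (acc : List String), 0 ≤ k → cs.drop k.toNat = u →
      (PySem.List.enumerate u k).foldl
        (fun out ic =>
          if PySem.Chars.isdigit ic.2 then out ++ [String.ofList [ic.2]]
          else
            match ([("one", "1"), ("two", "2"), ("three", "3"), ("four", "4"),
                    ("five", "5"), ("six", "6"), ("eight", "8"), ("nine", "9")] : List (String × String)).find?
                (fun wd => PySem.Chars.startswith (cs.drop ic.1.toNat) wd.1.toList) with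
            | some wd => out ++ [wd.2]
            | none => out) acc
      = acc ++ (cscan K8 u).map (fun c => String.ofList [c]) := by
  intro u
  induction u with
  | nil =>
    intro k acc _ _
    simp [PySem.List.enumerate, cscan_nil]
  | cons c u' ih =>
    intro k acc hk hdrop
    have hk1 : ((k + 1).toNat) = k.toNat + 1 := by omega
    have hdrop' : cs.drop (k + 1).toNat = u' := by
      rw [hk1, ← List.tail_drop, hdrop, List.tail_cons]
    rw [show PySem.List.enumerate (c :: u') k = (k, c) :: PySem.List.enumerate u' (k + 1) by
      simp [PySem.List.enumerate]]
    rw [List.foldl_cons]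
    by_cases hd : PySem.Chars.isdigit c
    · simp only [hd, if_pos]
      rw [ih (k + 1) _ (by omega) hdrop', cscan_cons]
      simp [hd]
    · simp only [hd, Bool.false_eq_true]
      simp only [hdrop]
      have hsplit :
          (match ([("one", "1"), ("two", "2"), ("three", "3"), ("four", "4"),
                   ("five", "5"), ("six", "6"), ("eight", "8"), ("nine", "9")] : List (String × String)).find?
              (fun wd => PySem.Chars.startswith (c :: u') wd.1.toList) with
           | some wd => acc ++ [wd.2]
           | none => acc)
          = acc ++ (match ([("one", "1"), ("two", "2"), ("three", "3"), ("four", "4"),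
                   ("five", "5"), ("six", "6"), ("eight", "8"), ("nine", "9")] : List (String × String)).find?
              (fun wd => PySem.Chars.startswith (c :: u') wd.1.toList) with
           | some wd => [wd.2]
           | none => ([] : List String)) := by
        cases (([("one", "1"), ("two", "2"), ("three", "3"), ("four", "4"),
                 ("five", "5"), ("six", "6"), ("eight", "8"), ("nine", "9")] : List (String × String)).find?
              (fun wd => PySem.Chars.startswith (c :: u') wd.1.toList)) <;> simp
      rw [hsplit, emitB (c :: u'), ih (k + 1) _ (by omega) hdrop', cscan_cons]
      simp only [hd, Bool.false_eq_true]
      cases K8.find? (fun p => p.1.isPrefixOf (c :: u')) <;> simp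

theorem B_chars (mot : String) : (word2num_alt mot).toList = cscan K8 mot.toList := by
  unfold word2num_alt
  rw [PySem.Str.toList_join]
  rw [show (PySem.Dict.mk [("one", "1"), ("two", "2"), ("three", "3"), ("four", "4"),
        ("five", "5"), ("six", "6"), ("eight", "8"), ("nine", "9")] : PySem.Dict String String).items
      = [("one", "1"), ("two", "2"), ("three", "3"), ("four", "4"),
         ("five", "5"), ("six", "6"), ("eight", "8"), ("nine", "9")] from rfl]
  rw [B_fold mot.toList mot.toList 0 [] le_rfl (by simp)]
  rw [List.nil_append, show "".toList = ([] : List Char) from rfl, List.map_map]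
  have hmap : (List.map (String.toList ∘ fun c => String.ofList [c]) (cscan K8 mot.toList))
      = List.map (fun c => [c]) (cscan K8 mot.toList) := by
    simp [Function.comp]
  rw [hmap, PySem.Chars.join_nil_singletons]


-- ===== VERDICT (by name: the statement is the Claim_ definition above) =====
theorem word2num_spec : Claim_equal_word2num := by
  intro mot _
  exact String.toList_inj.mp (by rw [A_chars, B_chars])
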